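-- pv_equiv track=rewrite | github.com/rwstorer/CubelessMail | mail/views.py | _is_special_folder
-- ===== SOURCE A (Python) =====
-- SPECIAL_FOLDERS = {
--     'inbox', 'sent', 'sent items', 'sent mail', 'drafts', 'trash',
--     'deleted items', 'junk', 'junk email', 'spam', 'archive',
-- }
--
-- def _is_special_folder(name):
--     normalized = name.strip().lower()
--     if normalized in SPECIAL_FOLDERS:
--         return True
--     # Sub-folder hierarchy variants: INBOX.Spam (Dovecot) or INBOX/Spam (Gmail, Courier, etc.)
--     for sep in ('.', '/'):
--         prefix = 'inbox' + sep
--         if normalized.startswith(prefix):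
--             suffix = normalized[len(prefix):]
--             if suffix in SPECIAL_FOLDERS:
--                 return True
--     return False
-- ===== SOURCE B (Python) =====
-- SPECIAL_FOLDERS = {
--     'inbox', 'sent', 'sent items', 'sent mail', 'drafts', 'trash',
--     'deleted items', 'junk', 'junk email', 'spam', 'archive',
-- }
--
-- def _is_special_folder(name):
--     # Single scan: locate the first '.' or '/' and dispatch on the split,
--     # instead of trying each 'inbox'+sep prefix in a loop.
--     normalized = name.strip().lower()
--     i = next((k for k, c in enumerate(normalized) if c in './'), -1)
--     if i < 0:
--         return normalized in SPECIAL_FOLDERS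
--     return normalized[:i] == 'inbox' and normalized[i + 1:] in SPECIAL_FOLDERS
-- ===== Notes on version B (the rewrite author's own statement) =====
-- stated objective: alternative
-- what changed: Replaces the loop that tries each 'inbox'+separator prefix with a single scan that finds the first '.' or '/' and splits the name once into root and suffix, dispatching on whether the root is 'inbox'.
import Mathlib
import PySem

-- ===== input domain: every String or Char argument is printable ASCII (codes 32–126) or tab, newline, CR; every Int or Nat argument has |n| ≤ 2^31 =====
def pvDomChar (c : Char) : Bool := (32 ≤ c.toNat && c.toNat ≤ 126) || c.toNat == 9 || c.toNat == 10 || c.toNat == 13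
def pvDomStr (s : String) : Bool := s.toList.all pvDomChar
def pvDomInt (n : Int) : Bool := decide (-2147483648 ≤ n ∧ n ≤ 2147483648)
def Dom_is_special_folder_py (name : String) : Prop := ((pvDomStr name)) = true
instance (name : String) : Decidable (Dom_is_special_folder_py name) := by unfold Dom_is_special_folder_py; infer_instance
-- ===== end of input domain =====

-- B replaces A's 'inbox'+separator prefix-trying loop by one scan for the first '.' or '/'
-- and a single split-and-dispatch; same return value, no speed claim.

-- ===== PORT A =====
-- SPECIAL_FOLDERS (a Python set of string literals, all distinct)
def pvSpecials : List (List Char) :=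
  ["inbox".toList, "sent".toList, "sent items".toList, "sent mail".toList,
   "drafts".toList, "trash".toList, "deleted items".toList, "junk".toList,
   "junk email".toList, "spam".toList, "archive".toList]

def is_special_folder_py (name : String) : Bool :=
  let normalized := PySem.Chars.lower (PySem.Chars.strip name.toList)
  if pvSpecials.contains normalized then true
  else
    -- for sep in ('.', '/'), unrolled: early 'return True' when the suffix matches
    if PySem.Chars.startswith normalized ('i'::'n'::'b'::'o'::'x'::'.'::[]) &&
       pvSpecials.contains (PySem.List.slice normalized (some 6) none) then true
    else if PySem.Chars.startswith normalized ('i'::'n'::'b'::'o'::'x'::'/'::[]) &&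
       pvSpecials.contains (PySem.List.slice normalized (some 6) none) then true
    else false

-- ===== PORT B =====
-- index of the first '.' or '/' (Python: next((k for k, c in enumerate(normalized) if c in './'), -1))
def pvFirstSep : List Char → Option Nat
  | [] => none
  | c :: cs => if c = '.' || c = '/' then some 0 else (pvFirstSep cs).map (· + 1)

def is_special_folder_py_alt (name : String) : Bool :=
  let normalized := PySem.Chars.lower (PySem.Chars.strip name.toList)
  match pvFirstSep normalized with
  | none => pvSpecials.contains normalized
  | some i =>
      -- normalized[:i] and normalized[i+1:] with 0 ≤ i < len: plain take/drop
      decide (normalized.take i = ('i'::'n'::'b'::'o'::'x'::[])) &&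
      pvSpecials.contains (normalized.drop (i + 1))

-- ===== PRECONDITION & SPEC =====
def Spec_is_special_folder_py (name : String) (out : Bool) : Prop := out = is_special_folder_py_alt name
instance (name : String) (out : Bool) : Decidable (Spec_is_special_folder_py name out) := by unfold Spec_is_special_folder_py; infer_instance

-- ===== CLAIM (what is proved, stated in full; the proofs are below) =====
def Claim_equal_is_special_folder_py : Prop := ∀ (name : String), Dom_is_special_folder_py name → Spec_is_special_folder_py name (is_special_folder_py name)

-- ===== LEMMAS AND PROOFS =====

lemma firstSep_none {l : List Char} (h : pvFirstSep l = none) :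
    ('.' : Char) ∉ l ∧ ('/' : Char) ∉ l := by
  induction l with
  | nil => simp
  | cons c cs ih =>
    by_cases hc : (c = '.' || c = '/') = true
    · simp [pvFirstSep, hc] at h
    · have h' : pvFirstSep cs = none := by
        cases hcs : pvFirstSep cs with
        | none => rfl
        | some j => simp [pvFirstSep, hc, hcs] at h
      obtain ⟨h1, h2⟩ := ih h'
      simp only [Bool.or_eq_true, decide_eq_true_eq, not_or] at hc
      constructor <;> intro hm <;> rcases List.mem_cons.mp hm with he | hm'
      · exact hc.1 he.symm
      · exact h1 hm'
      · exact hc.2 he.symm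
      · exact h2 hm'

lemma firstSep_some {l : List Char} {i : Nat} (h : pvFirstSep l = some i) :
    ∃ p c r, l = p ++ c :: r ∧ p.length = i ∧ (c = '.' ∨ c = '/') ∧
      ('.' : Char) ∉ p ∧ ('/' : Char) ∉ p := by
  induction l generalizing i with
  | nil => simp [pvFirstSep] at h
  | cons c cs ih =>
    by_cases hc : (c = '.' || c = '/') = true
    · have hi : i = 0 := by simpa [pvFirstSep, hc] using h.symm
      exact ⟨[], c, cs, by simp, by simp [hi], by simpa using hc, by simp, by simp⟩
    · cases hcs : pvFirstSep cs with
      | none => simp [pvFirstSep, hc, hcs] at h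
      | some j =>
        have hij : i = j + 1 := by simpa [pvFirstSep, hc, hcs] using h.symm
        rcases ih hcs with ⟨p, c', r, rfl, hlen, hsep, hp1, hp2⟩
        simp only [Bool.or_eq_true, decide_eq_true_eq, not_or] at hc
        refine ⟨c :: p, c', r, by simp, by simp [hlen, hij], hsep, ?_, ?_⟩
        · intro hm
          rcases List.mem_cons.mp hm with he | hm'
          · exact hc.1 he.symm
          · exact hp1 hm'
        · intro hm
          rcases List.mem_cons.mp hm with he | hm'
          · exact hc.2 he.symm
          · exact hp2 hm'

lemma specials_nosep {s : List Char} (h : s ∈ pvSpecials) :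
    ('.' : Char) ∉ s ∧ ('/' : Char) ∉ s := by
  fin_cases h <;> decide

lemma notin_specials_of_sep {l : List Char} {c : Char} (hc : c = '.' ∨ c = '/')
    (hmem : c ∈ l) : l ∉ pvSpecials := by
  intro hl
  rcases specials_nosep hl with ⟨h1, h2⟩
  rcases hc with rfl | rfl
  · exact h1 hmem
  · exact h2 hmem

lemma core_eq (l : List Char) :
    (if pvSpecials.contains l then true
     else
      if PySem.Chars.startswith l ('i'::'n'::'b'::'o'::'x'::'.'::[]) &&
         pvSpecials.contains (PySem.List.slice l (some 6) none) then true
      else if PySem.Chars.startswith l ('i'::'n'::'b'::'o'::'x'::'/'::[]) &&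
         pvSpecials.contains (PySem.List.slice l (some 6) none) then true
      else false) =
    (match pvFirstSep l with
     | none => pvSpecials.contains l
     | some i => decide (l.take i = ('i'::'n'::'b'::'o'::'x'::[])) &&
         pvSpecials.contains (l.drop (i + 1))) := by
  have hslice : PySem.List.slice l (some 6) none = l.drop 6 := by
    simpa using PySem.List.slice_from l (a := 6) (by norm_num)
  cases hf : pvFirstSep l with
  | none =>
    rcases firstSep_none hf with ⟨hd, hs⟩
    have h1 : PySem.Chars.startswith l ('i'::'n'::'b'::'o'::'x'::'.'::[]) = false := by
      rw [Bool.eq_false_iff]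
      intro hT
      exact hd (((PySem.Chars.startswith_iff l _).mp hT).subset (by simp))
    have h2 : PySem.Chars.startswith l ('i'::'n'::'b'::'o'::'x'::'/'::[]) = false := by
      rw [Bool.eq_false_iff]
      intro hT
      exact hs (((PySem.Chars.startswith_iff l _).mp hT).subset (by simp))
    simp [h1, h2]
  | some i =>
    rcases firstSep_some hf with ⟨p, c, r, rfl, hlen, hsep, hp1, hp2⟩
    have hnotin : p ++ c :: r ∉ pvSpecials := notin_specials_of_sep hsep (by simp)
    have hmem : pvSpecials.contains (p ++ c :: r) = false := by
      rw [List.contains_eq_mem]; simpa using hnotin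
    by_cases hsw1 : PySem.Chars.startswith (p ++ c :: r) ('i'::'n'::'b'::'o'::'x'::'.'::[]) = true
    · rcases (PySem.Chars.startswith_iff _ _).mp hsw1 with ⟨rest, hrest⟩
      have hi : i = 5 := by
        have := hf
        rw [← hrest] at this
        simpa [pvFirstSep] using this.symm
      subst hi
      have htake : (p ++ c :: r).take 5 = ('i'::'n'::'b'::'o'::'x'::[]) := by rw [← hrest]; rfl
      have hdrop : (p ++ c :: r).drop 6 = rest := by rw [← hrest]; rfl
      simp only [hmem, hslice, hsw1, htake, hdrop, Bool.false_eq_true, if_false, Bool.true_and,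
        decide_true]
      cases hm : pvSpecials.contains rest <;> simp
    · by_cases hsw2 : PySem.Chars.startswith (p ++ c :: r) ('i'::'n'::'b'::'o'::'x'::'/'::[]) = true
      · rcases (PySem.Chars.startswith_iff _ _).mp hsw2 with ⟨rest, hrest⟩
        have hi : i = 5 := by
          have := hf
          rw [← hrest] at this
          simpa [pvFirstSep] using this.symm
        subst hi
        have htake : (p ++ c :: r).take 5 = ('i'::'n'::'b'::'o'::'x'::[]) := by rw [← hrest]; rfl
        have hdrop : (p ++ c :: r).drop 6 = rest := by rw [← hrest]; rfl
        simp only [hmem, hslice, hsw2, htake, hdrop, Bool.false_eq_true, if_false, Bool.true_and,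
          decide_true]
        cases hm : pvSpecials.contains rest <;> simp [hsw1]
      · -- neither prefix matches: B's root test must fail too
        have htake : (p ++ c :: r).take i = p := by
          rw [← hlen]; simp
        have hroot : decide ((p ++ c :: r).take i = ('i'::'n'::'b'::'o'::'x'::[])) = false := by
          rw [htake]
          by_contra h
          have hp : p = ('i'::'n'::'b'::'o'::'x'::[]) := by simpa using h
          subst hp
          rcases hsep with rfl | rfl
          · exact hsw1 ((PySem.Chars.startswith_iff _ _).mpr ⟨r, rfl⟩)
          · exact hsw2 ((PySem.Chars.startswith_iff _ _).mpr ⟨r, rfl⟩)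
        simp [hnotin, Bool.eq_false_iff.mpr hsw1, Bool.eq_false_iff.mpr hsw2, hroot]

-- ===== VERDICT (by name: the statement is the Claim_ definition above) =====
theorem is_special_folder_py_spec : Claim_equal_is_special_folder_py := by
  intro name _
  unfold Spec_is_special_folder_py is_special_folder_py is_special_folder_py_alt
  exact core_eq _
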